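-- pv_equiv track=rewrite | github.com/jason134-gt/kn-fetch | src/extract/agents/optimization/iteration_optimizer.py | _fix_heading_format
-- ===== SOURCE A (Python) =====
-- def _fix_heading_format(content: str) -> str:
--     """修复标题格式"""
--     lines = content.split('\n')
--     fixed_lines = []
--
--     for line in lines:
--         # 确保标题前后有空行
--         if line.startswith('#') and fixed_lines:
--             if fixed_lines[-1].strip():
--                 fixed_lines.append('')
--         fixed_lines.append(line)
--
--     return '\n'.join(fixed_lines)
-- ===== SOURCE B (Python) =====
-- def _fix_heading_format(content: str) -> str:
--     out = []
--     prev_nonblank = False   # previous line contained non-whitespace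
--     cur_nonblank = False    # current line (so far) contains non-whitespace
--     at_start = True         # we are at the first character of a line
--     for ch in content:
--         if at_start and ch == '#' and prev_nonblank:
--             out.append('\n')
--         out.append(ch)
--         if ch == '\n':
--             prev_nonblank = cur_nonblank
--             cur_nonblank = False
--             at_start = True
--         else:
--             cur_nonblank = cur_nonblank or not ch.isspace()
--             at_start = False
--     return ''.join(out)
-- ===== Notes on version B (the rewrite author's own statement) =====
-- stated objective: alternative
-- what changed: Replaced A's split-into-lines loop with a look-back at fixed_lines[-1] (and a final '\n'.join) by a single character-level state-machine pass that tracks whether the previous/current line contains non-whitespace and inserts the blank line in-stream.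
import Mathlib
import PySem

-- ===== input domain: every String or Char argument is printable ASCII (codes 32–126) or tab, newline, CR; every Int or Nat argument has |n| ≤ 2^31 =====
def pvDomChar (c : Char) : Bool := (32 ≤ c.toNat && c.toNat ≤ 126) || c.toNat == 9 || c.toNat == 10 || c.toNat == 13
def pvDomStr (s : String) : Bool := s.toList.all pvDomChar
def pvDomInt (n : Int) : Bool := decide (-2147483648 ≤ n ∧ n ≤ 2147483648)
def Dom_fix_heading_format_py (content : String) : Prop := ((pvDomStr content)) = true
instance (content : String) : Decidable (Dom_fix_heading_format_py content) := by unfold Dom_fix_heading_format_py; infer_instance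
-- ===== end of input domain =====

-- B replaces A's split-into-lines buffer loop (with a look-back at fixed_lines[-1])
-- by a single character-level state-machine pass; objective: alternative (same cost, no line list).

-- ===== PORT A =====
-- A, transliterated on the List Char side of PySem strings:
-- lines = content.split('\n'); loop appending to fixed_lines, looking back at fixed_lines[-1]; '\n'.join.
def fixHeadingStepA (fixed : List (List Char)) (line : List Char) : List (List Char) :=
  let fixed :=
    if PySem.Chars.startswith line ['#'] && !fixed.isEmpty then
      (if PySem.Chars.strip (PySem.List.pyGetD fixed (-1) []) ≠ ([] : List Char) then
        fixed ++ [[]] else fixed)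
    else fixed
  fixed ++ [line]

def fix_heading_format_py (content : String) : String :=
  let lines := PySem.Chars.splitOn content.toList ['\n']
  let fixed := lines.foldl fixHeadingStepA []
  String.ofList (PySem.Chars.join ['\n'] fixed)

-- ===== PORT B =====
-- B (Source B): one pass over the characters; state (out, prev_nonblank, cur_nonblank, at_start).
def fixHeadingStepB (st : List Char × Bool × Bool × Bool) (ch : Char) : List Char × Bool × Bool × Bool :=
  let out := st.1
  let prev_nonblank := st.2.1
  let cur_nonblank := st.2.2.1
  let at_start := st.2.2.2
  let out := if at_start && ch == '#' && prev_nonblank then out ++ ['\n'] else out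
  let out := out ++ [ch]
  if ch == '\n' then (out, cur_nonblank, false, true)
  else (out, prev_nonblank, cur_nonblank || !PySem.Chars.isspace ch, false)

def fix_heading_format_py_alt (content : String) : String :=
  String.ofList (content.toList.foldl fixHeadingStepB ([], false, false, true)).1

-- ===== PRECONDITION & SPEC =====
def Spec_fix_heading_format_py (content : String) (out : String) : Prop := out = fix_heading_format_py_alt content
instance (content : String) (out : String) : Decidable (Spec_fix_heading_format_py content out) := by unfold Spec_fix_heading_format_py; infer_instance

-- ===== CLAIM (what is proved, stated in full; the proofs are below) =====
def Claim_equal_fix_heading_format_py : Prop := ∀ (content : String), Dom_fix_heading_format_py content → Spec_fix_heading_format_py content (fix_heading_format_py content)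

-- ===== LEMMAS AND PROOFS =====

-- a line contains a non-whitespace character
def pvHasNS (l : List Char) : Bool := l.any (fun c => !PySem.Chars.isspace c)

-- line-level specification both ports are reduced to: prev = "previous line non-blank"
def pvFixSpec (prev : Bool) : List (List Char) → List (List Char)
  | [] => []
  | l :: ls =>
      (if PySem.Chars.startswith l ['#'] && prev then [[], l] else [l]) ++ pvFixSpec (pvHasNS l) ls

-- structural description of content.split('\n')
def pvGlue (p : List Char) : List (List Char) → List (List Char)
  | [] => [p]
  | x :: xs => (p ++ x) :: xs

def pvSplit : List Char → List (List Char)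
  | [] => [[]]
  | c :: cs => if c = '\n' then [] :: pvSplit cs else pvGlue [c] (pvSplit cs)

theorem pvSplit_ne_nil (cs : List Char) : pvSplit cs ≠ [] := by
  induction cs with
  | nil => simp [pvSplit]
  | cons c cs ih =>
    simp only [pvSplit]
    split
    · simp
    · cases h : pvSplit cs with
      | nil => exact absurd h ih
      | cons x xs => simp [pvGlue]

theorem pvSplit_no_newline (cs : List Char) : ∀ l ∈ pvSplit cs, '\n' ∉ l := by
  induction cs with
  | nil => simp [pvSplit]
  | cons c cs ih =>
    simp only [pvSplit]
    split
    · intro l hl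
      rcases List.mem_cons.mp hl with h | h
      · simp [h]
      · exact ih l h
    · rename_i hc
      cases hsp : pvSplit cs with
      | nil => exact absurd hsp (pvSplit_ne_nil cs)
      | cons x xs =>
        intro l hl
        simp only [pvGlue] at hl
        rcases List.mem_cons.mp hl with h1 | h1
        · subst h1
          intro hmem
          rcases List.mem_append.mp hmem with h2 | h2
          · simp at h2; exact hc h2.symm
          · exact ih x (hsp ▸ List.mem_cons_self ..) h2
        · exact ih l (hsp ▸ List.mem_cons_of_mem _ h1)

theorem pvJoin_pvSplit (cs : List Char) :
    PySem.Chars.join ['\n'] (pvSplit cs) = cs := by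
  induction cs with
  | nil => simp [pvSplit, PySem.Chars.join_singleton]
  | cons c cs ih =>
    simp only [pvSplit]
    split
    · rename_i hc
      subst hc
      cases h : pvSplit cs with
      | nil => exact absurd h (pvSplit_ne_nil cs)
      | cons x xs =>
        rw [PySem.Chars.join_cons_cons]
        rw [h] at ih
        simp [ih]
    · cases h : pvSplit cs with
      | nil => exact absurd h (pvSplit_ne_nil cs)
      | cons x xs =>
        rw [h] at ih
        cases xs with
        | nil =>
          simp only [pvGlue, PySem.Chars.join_singleton] at *
          simp [ih]
        | cons y ys =>
          simp only [pvGlue, PySem.Chars.join_cons_cons] at *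
          simp [ih]

-- splitOn with a one-character separator computes pvSplit
theorem pvGo_eq (fuel : Nat) : ∀ (l cur : List Char) (acc : List (List Char)),
    l.length ≤ fuel →
    PySem.Chars.splitOn.go ['\n'] fuel l cur acc =
      acc.reverse ++ pvGlue cur.reverse (pvSplit l) := by
  induction fuel with
  | zero =>
    intro l cur acc hl
    have : l = [] := List.length_eq_zero_iff.mp (Nat.le_zero.mp hl)
    subst this
    simp [PySem.Chars.splitOn.go, pvSplit, pvGlue]
  | succ n ih =>
    intro l cur acc hl
    cases l with
    | nil => simp [PySem.Chars.splitOn.go, pvSplit, pvGlue]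
    | cons c rest =>
      simp only [PySem.Chars.splitOn.go]
      by_cases hc : c = '\n'
      · subst hc
        have hpre : List.isPrefixOf ['\n'] ('\n' :: rest) = true := by
          simp [List.isPrefixOf]
        simp only [hpre, if_pos, List.length_cons, List.length_nil, List.drop_succ_cons, List.drop_zero]
        rw [ih rest [] ((cur.reverse) :: acc) (by simp at hl; omega)]
        simp only [pvSplit, if_pos]
        cases h : pvSplit rest with
        | nil => exact absurd h (pvSplit_ne_nil rest)
        | cons x xs => simp [pvGlue]
      · have hpre : List.isPrefixOf ['\n'] (c :: rest) = false := by
          simp only [List.isPrefixOf, Bool.and_eq_false_iff]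
          left
          simp [Ne.symm hc]
        rw [if_neg (by simp [hpre])]
        rw [ih rest (c :: cur) acc (by simp at hl; omega)]
        simp only [pvSplit, if_neg hc]
        cases h : pvSplit rest with
        | nil => exact absurd h (pvSplit_ne_nil rest)
        | cons x xs => simp [pvGlue]

theorem pvSplitOn_newline (cs : List Char) :
    PySem.Chars.splitOn cs ['\n'] = pvSplit cs := by
  have := pvGo_eq (cs.length + 1) cs [] [] (by omega)
  simp only [PySem.Chars.splitOn] at *
  rw [this]
  cases h : pvSplit cs with
  | nil => exact absurd h (pvSplit_ne_nil cs)
  | cons x xs => simp [pvGlue]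

-- strip is empty exactly when the line has no non-whitespace character
theorem pvStrip_ne_nil_iff (l : List Char) :
    (PySem.Chars.strip l ≠ ([] : List Char)) ↔ pvHasNS l = true := by
  constructor
  · intro h
    by_contra hns
    apply h
    have hall : ∀ c ∈ l, PySem.Chars.isspace c = true := by
      intro c hc
      by_contra hcs
      exact hns (List.any_eq_true.mpr ⟨c, hc, by simp [hcs]⟩)
    simp only [PySem.Chars.strip, PySem.Chars.lstrip, PySem.Chars.rstrip]
    rw [List.dropWhile_eq_nil_iff.mpr hall]
    simp
  · intro h hnil
    rcases List.any_eq_true.mp h with ⟨c, hc, hcs⟩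
    simp only [PySem.Chars.strip, PySem.Chars.lstrip, PySem.Chars.rstrip] at hnil
    have h1 : List.dropWhile PySem.Chars.isspace l ≠ [] := by
      intro h2
      have := List.dropWhile_eq_nil_iff.mp h2 c hc
      simp at hcs
      exact absurd this (by simp [hcs])
    have hcd : c ∈ List.dropWhile PySem.Chars.isspace l := by
      rcases List.mem_append.mp ((List.takeWhile_append_dropWhile (p := PySem.Chars.isspace) (l := l)) ▸ hc) with h1 | h1
      · exact absurd (List.mem_takeWhile_imp h1) (by simpa using hcs)
      · exact h1
    have h2 := List.reverse_eq_nil_iff.mp hnil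
    have h3 := List.dropWhile_eq_nil_iff.mp h2 c (List.mem_reverse.mpr hcd)
    simp [h3] at hcs

-- ===== A reduces to pvFixSpec =====
theorem pvStepA_inv (ls : List (List Char)) :
    ∀ (fixed : List (List Char)) (l : List Char) (h : fixed ≠ []),
    fixed.getLast h = l →
    ls.foldl fixHeadingStepA fixed = fixed ++ pvFixSpec (pvHasNS l) ls := by
  induction ls with
  | nil => intro fixed l h hl; simp [pvFixSpec]
  | cons l2 ls ih =>
    intro fixed l h hl
    have hne : !fixed.isEmpty = true := by simp [List.isEmpty_iff, h]
    have hne2 : fixed.isEmpty = false := by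
      cases fixed with
      | nil => exact absurd rfl h
      | cons a as => rfl
    have hstep : fixHeadingStepA fixed l2 =
        (fixed ++ (if PySem.Chars.startswith l2 ['#'] && pvHasNS l then [([] : List Char)] else [])) ++ [l2] := by
      simp only [fixHeadingStepA, hne2]
      rw [PySem.List.pyGetD_neg_one fixed [] h, hl]
      by_cases h1 : PySem.Chars.startswith l2 ['#'] = true
      · by_cases h2 : pvHasNS l = true
        · simp [h1, h2, (pvStrip_ne_nil_iff l).mpr h2]
        · have hs : ¬ PySem.Chars.strip l ≠ [] := fun hc => h2 ((pvStrip_ne_nil_iff l).mp hc)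
          simp [h1, h2, hs]
      · simp [h1]
    have hlast : ∀ (h2 : (fixed ++ (if PySem.Chars.startswith l2 ['#'] && pvHasNS l then [([] : List Char)] else [])) ++ [l2] ≠ []),
        ((fixed ++ (if PySem.Chars.startswith l2 ['#'] && pvHasNS l then [([] : List Char)] else [])) ++ [l2]).getLast h2 = l2 := by
      intro h2
      simp
    simp only [List.foldl_cons, hstep]
    rw [ih _ l2 (by simp) (hlast _)]
    simp only [pvFixSpec]
    by_cases h1 : PySem.Chars.startswith l2 ['#'] = true
    · by_cases h2 : pvHasNS l = true
      · simp [h1, h2]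
      · simp [h1, h2]
    · simp [h1]

theorem pvA_eq (cs : List Char) :
    (PySem.Chars.splitOn cs ['\n']).foldl fixHeadingStepA [] =
      pvFixSpec false (pvSplit cs) := by
  rw [pvSplitOn_newline]
  cases hsp : pvSplit cs with
  | nil => exact absurd hsp (pvSplit_ne_nil cs)
  | cons l0 rest =>
    have h0 : fixHeadingStepA [] l0 = [l0] := by
      simp [fixHeadingStepA]
    simp only [List.foldl_cons, h0]
    rw [pvStepA_inv rest [l0] l0 (by simp) (by simp)]
    simp [pvFixSpec]

-- ===== B reduces to pvFixSpec =====
theorem pvStepB_line (l : List Char) :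
    ∀ (out : List Char) (prev cur start : Bool), '\n' ∉ l →
    l.foldl fixHeadingStepB (out, prev, cur, start) =
      ((if start && PySem.Chars.startswith l ['#'] && prev then out ++ ['\n'] else out) ++ l,
        prev, cur || pvHasNS l, start && l.isEmpty) := by
  induction l with
  | nil =>
    intro out prev cur start _
    simp [pvHasNS, PySem.Chars.startswith, List.isPrefixOf]
  | cons c rest ih =>
    intro out prev cur start hnl
    have hc : ¬ c = '\n' := fun h => hnl (h ▸ List.mem_cons_self ..)
    have hr : '\n' ∉ rest := fun h => hnl (List.mem_cons_of_mem _ h)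
    have hstep : fixHeadingStepB (out, prev, cur, start) c =
        ((if start && (c == '#') && prev then out ++ ['\n'] else out) ++ [c],
          prev, cur || !PySem.Chars.isspace c, false) := by
      simp only [fixHeadingStepB]
      rw [if_neg (by simp [hc])]
    simp only [List.foldl_cons, hstep]
    rw [ih _ prev _ false hr]
    have hsw : PySem.Chars.startswith (c :: rest) ['#'] = (c == '#') := by
      simp [PySem.Chars.startswith, List.isPrefixOf, eq_comm]
    have hns : pvHasNS (c :: rest) = (!PySem.Chars.isspace c || pvHasNS rest) := by
      simp [pvHasNS]
    simp only [hsw, hns, Bool.false_and, Bool.and_false, if_neg, Bool.false_eq_true,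
      not_false_iff, List.isEmpty_cons, Bool.and_false, Bool.or_assoc]
    by_cases hcond : (start && (c == '#') && prev) = true
    · simp [hcond, List.append_assoc]
    · simp [hcond, List.append_assoc]

theorem pvFixSpec_cons_ne_nil (prev : Bool) (l : List Char) (ls : List (List Char)) :
    pvFixSpec prev (l :: ls) ≠ [] := by
  simp only [pvFixSpec]
  by_cases h : (PySem.Chars.startswith l ['#'] && prev) = true <;> simp [h]

theorem pvB_lines (L : List (List Char)) :
    ∀ (out : List Char) (prev : Bool), L ≠ [] → (∀ l ∈ L, '\n' ∉ l) →
    ((PySem.Chars.join ['\n'] L).foldl fixHeadingStepB (out, prev, false, true)).1 =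
      out ++ PySem.Chars.join ['\n'] (pvFixSpec prev L) := by
  induction L with
  | nil => intro out prev h _; exact absurd rfl h
  | cons l ls ih =>
    intro out prev _ hnl
    have hl : '\n' ∉ l := hnl l (List.mem_cons_self ..)
    cases ls with
    | nil =>
      rw [PySem.Chars.join_singleton]
      rw [pvStepB_line l out prev false true hl]
      simp only [pvFixSpec, Bool.true_and]
      by_cases hcond : (PySem.Chars.startswith l ['#'] && prev) = true
      · rw [if_pos hcond, if_pos hcond]
        simp only [List.append_nil]
        rw [PySem.Chars.join_cons_cons, PySem.Chars.join_singleton]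
        simp
      · rw [if_neg hcond, if_neg hcond]
        simp [PySem.Chars.join_singleton]
    | cons l2 ls2 =>
      rw [PySem.Chars.join_cons_cons]
      rw [List.append_assoc, List.foldl_append]
      rw [pvStepB_line l out prev false true hl]
      have hstep : ∀ (o : List Char) (p c st : Bool),
          fixHeadingStepB (o, p, c, st) '\n' = (o ++ ['\n'], c, false, true) := by
        intro o p c st
        simp [fixHeadingStepB]
      rw [List.singleton_append, List.foldl_cons, hstep]
      simp only [Bool.false_or]
      rw [ih _ (pvHasNS l) (by simp) (fun x hx => hnl x (List.mem_cons_of_mem _ hx))]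
      have hR : pvFixSpec (pvHasNS l) (l2 :: ls2) ≠ [] := pvFixSpec_cons_ne_nil _ _ _
      cases hRe : pvFixSpec (pvHasNS l) (l2 :: ls2) with
      | nil => exact absurd hRe hR
      | cons r rs =>
        conv_rhs => rw [pvFixSpec]
        rw [hRe]
        by_cases hcond : (PySem.Chars.startswith l ['#'] && prev) = true
        · rw [if_pos hcond, if_pos (by simp [hcond])]
          simp only [List.cons_append, List.nil_append]
          rw [PySem.Chars.join_cons_cons, PySem.Chars.join_cons_cons]
          simp
        · rw [if_neg hcond, if_neg (by simp [hcond])]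
          simp only [List.cons_append, List.nil_append]
          rw [PySem.Chars.join_cons_cons]
          simp

-- ===== VERDICT (by name: the statement is the Claim_ definition above) =====
theorem fix_heading_format_py_spec : Claim_equal_fix_heading_format_py := by
  intro content _
  show String.ofList
      (PySem.Chars.join ['\n'] ((PySem.Chars.splitOn content.toList ['\n']).foldl fixHeadingStepA [])) =
    String.ofList (content.toList.foldl fixHeadingStepB ([], false, false, true)).1
  rw [pvA_eq]
  have hjoin := pvJoin_pvSplit content.toList
  cases hsp : pvSplit content.toList with
  | nil => exact absurd hsp (pvSplit_ne_nil content.toList)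
  | cons l0 rest =>
    rw [hsp] at hjoin
    conv_rhs => rw [← hjoin]
    rw [pvB_lines (l0 :: rest) [] false (by simp)
      (fun x hx => pvSplit_no_newline content.toList x (hsp ▸ hx))]
    simp only [List.nil_append]
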